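-- pv_equiv track=rewrite | github.com/Haeryz/Praktikum-fungsional | Hariz_308_01.py | count_non_prime_fibonacci_in_range
-- ===== SOURCE A (Python) =====
-- import math
--
-- def sieve_of_eratosthenes(limit):
--     is_prime = [True] * (limit + 1)
--     is_prime[0] = is_prime[1] = False
--
--     for i in range(2, int(math.sqrt(limit)) + 1):
--         if is_prime[i]:
--             for j in range(i * i, limit + 1, i):
--                 is_prime[j] = False
--     return is_prime
--
-- def count_non_prime_fibonacci_in_range(n, m):
--     # Precompute primes up to 10^6
--     max_limit = 10**6
--     prime_check = sieve_of_eratosthenes(max_limit)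
--
--     # Initialize Fibonacci numbers
--     a, b = 0, 1
--     non_prime_count = 0
--     current_position = 2  # Fibonacci position (since a=0 and b=1 are already initialized)
--
--     # Iterate through Fibonacci numbers, but stop once Fibonacci exceeds max_limit
--     while b <= max_limit and current_position <= m:
--         if current_position >= n:
--             # Check if the Fibonacci number is non-prime
--             if not prime_check[b]:
--                 non_prime_count += 1
--
--         # Move to the next Fibonacci number
--         a, b = b, a + b
--         current_position += 1
--
--     return non_prime_count
-- ===== SOURCE B (Python) =====
-- def count_non_prime_fibonacci_in_range(n, m):
--     # Trial division instead of a million-entry sieve: the only numbers whose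
--     # primality matters are the ~30 Fibonacci numbers <= 10**6.
--     def is_prime(x):
--         if x < 2:
--             return False
--         i = 2
--         while i * i <= x:
--             if x % i == 0:
--                 return False
--             i += 1
--         return True
--
--     max_limit = 10**6
--     fibs = []
--     a, b = 0, 1
--     while b <= max_limit:
--         fibs.append(b)
--         a, b = b, a + b
--
--     count = 0
--     for pos, f in enumerate(fibs, start=2):
--         if n <= pos <= m and not is_prime(f):
--             count += 1
--     return count
-- ===== Notes on version B (the rewrite author's own statement) =====
-- stated objective: faster
-- what changed: B replaces the million-entry Sieve of Eratosthenes with direct trial division applied only to the ~30 Fibonacci numbers <= 10^6, collected once into a list and counted with enumerate.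
import Mathlib
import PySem

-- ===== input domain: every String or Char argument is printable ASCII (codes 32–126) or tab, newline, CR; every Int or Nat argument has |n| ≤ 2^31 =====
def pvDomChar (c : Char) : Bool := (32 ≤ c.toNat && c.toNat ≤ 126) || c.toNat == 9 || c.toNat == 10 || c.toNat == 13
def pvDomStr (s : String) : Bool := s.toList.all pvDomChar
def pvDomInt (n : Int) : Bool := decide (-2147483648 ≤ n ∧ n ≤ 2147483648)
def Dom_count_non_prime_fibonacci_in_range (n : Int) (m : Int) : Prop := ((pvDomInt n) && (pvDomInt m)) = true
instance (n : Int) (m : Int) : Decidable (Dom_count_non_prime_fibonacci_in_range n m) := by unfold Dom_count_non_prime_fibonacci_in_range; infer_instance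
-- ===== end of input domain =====

-- B replaces A's million-entry sieve by trial division on the ~30 Fibonacci numbers ≤ 10^6 (objective: faster, constant-factor).

-- ===== PORT A =====
-- inner loop `for j in range(i*i, limit+1, i): is_prime[j] = False`;
-- the `0 < i` conjunct is a totality guard only (A always calls this with i ≥ 2)
def markMultiples (i limit j : Nat) (arr : Array Bool) : Array Bool :=
  if _h : 0 < i ∧ j ≤ limit then markMultiples i limit (j + i) (arr.set! j false) else arr
termination_by limit + 1 - j
decreasing_by omega

-- outer loop `for i in range(2, int(math.sqrt(limit)) + 1)`
def sieveLoopA (limit bound i : Nat) (arr : Array Bool) : Array Bool :=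
  if i ≤ bound then
    sieveLoopA limit bound (i + 1)
      (if arr.getD i false then markMultiples i limit (i * i) arr else arr)
  else arr
termination_by bound + 1 - i

-- int(math.sqrt(limit)) is ported as Nat.sqrt: exact here, since A only calls this at
-- limit = 10^6, where math.sqrt returns exactly 1000.0
def sieve_of_eratosthenes (limit : Nat) : Array Bool :=
  sieveLoopA limit (Nat.sqrt limit) 2
    (((Array.replicate (limit + 1) true).set! 0 false).set! 1 false)

-- the `while b <= max_limit and current_position <= m` loop; from the actual start state
-- (a, b) = (0, 1) it runs at most 30 iterations (then b > 10^6), so fuel 40 is a totality guard only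
def fibLoopA (pc : Array Bool) (n m : Int) (fuel a b : Nat) (pos cnt : Int) : Int :=
  match fuel with
  | 0 => cnt
  | fuel + 1 =>
    if b ≤ 1000000 ∧ pos ≤ m then
      fibLoopA pc n m fuel b (a + b) (pos + 1)
        (if n ≤ pos then (if !(pc.getD b false) then cnt + 1 else cnt) else cnt)
    else cnt

def count_non_prime_fibonacci_in_range (n : Int) (m : Int) : Int :=
  fibLoopA (sieve_of_eratosthenes 1000000) n m 40 0 1 2 0

-- ===== PORT B =====
-- `while i * i <= x: if x % i == 0: return False; i += 1`
def trialLoop (x i : Nat) : Bool :=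
  if _h : i * i ≤ x then (if x % i = 0 then false else trialLoop x (i + 1)) else true
termination_by x + 1 - i
decreasing_by
  rcases Nat.eq_zero_or_pos i with h0 | h0
  · subst h0; omega
  · have hi : i ≤ i * i := Nat.le_mul_of_pos_left i h0
    omega

def is_prime_B (x : Nat) : Bool := if x < 2 then false else trialLoop x 2

-- `while b <= max_limit: fibs.append(b); a, b = b, a + b`; fuel 40 is a totality guard only
-- (from (0, 1) at most 30 values are appended)
def genFibs (fuel a b : Nat) : List Nat :=
  match fuel with
  | 0 => []
  | f + 1 => if b ≤ 1000000 then b :: genFibs f b (a + b) else []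

-- `enumerate(fibs, start=2)`
def enumFrom (pos : Int) : List Nat → List (Int × Nat)
  | [] => []
  | f :: t => (pos, f) :: enumFrom (pos + 1) t

def count_non_prime_fibonacci_in_range_alt (n : Int) (m : Int) : Int :=
  (enumFrom 2 (genFibs 40 0 1)).foldl
    (fun c pf => if n ≤ pf.1 ∧ pf.1 ≤ m ∧ !is_prime_B pf.2 then c + 1 else c) 0

-- ===== PRECONDITION & SPEC =====
def Spec_count_non_prime_fibonacci_in_range (n : Int) (m : Int) (out : Int) : Prop := out = count_non_prime_fibonacci_in_range_alt n m
instance (n : Int) (m : Int) (out : Int) : Decidable (Spec_count_non_prime_fibonacci_in_range n m out) := by unfold Spec_count_non_prime_fibonacci_in_range; infer_instance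

-- ===== CLAIM (what is proved, stated in full; the proofs are below) =====
def Claim_equal_count_non_prime_fibonacci_in_range : Prop := ∀ (n : Int) (m : Int), Dom_count_non_prime_fibonacci_in_range n m → Spec_count_non_prime_fibonacci_in_range n m (count_non_prime_fibonacci_in_range n m)

-- ===== LEMMAS AND PROOFS =====

theorem getD_set! (arr : Array Bool) (j k : Nat) (v : Bool) (hj : j < arr.size) :
    (arr.set! j v).getD k false = if j = k then v else arr.getD k false := by
  simp only [Array.set!_eq_setIfInBounds, Array.getD_eq_getD_getElem?,
    Array.getElem?_setIfInBounds]
  split_ifs with h1 <;> simp_all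

theorem mark_size (i limit j : Nat) (arr : Array Bool) :
    (markMultiples i limit j arr).size = arr.size := by
  fun_induction markMultiples i limit j arr with
  | case1 j arr h ih => rw [ih]; simp
  | case2 => rfl

theorem mark_getD (i limit j : Nat) (arr : Array Bool) (k : Nat) (hi : 0 < i) :
    arr.size = limit + 1 →
    ((markMultiples i limit j arr).getD k false = true ↔
      arr.getD k false = true ∧ ¬(k ≤ limit ∧ ∃ q, k = j + i * q)) := by
  fun_induction markMultiples i limit j arr with
  | case1 j arr h ih =>
    intro hsz
    rw [ih (by simp [hsz])]
    rw [getD_set! arr j k false (by omega)]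
    by_cases hjk : j = k
    · subst hjk
      simp only [if_true]
      constructor
      · rintro ⟨hf, -⟩; exact absurd hf (by simp)
      · rintro ⟨-, hnot⟩; exact absurd ⟨h.2, 0, by omega⟩ hnot
    · rw [if_neg hjk]
      have hiff : (k ≤ limit ∧ ∃ q, k = j + i + i * q) ↔ (k ≤ limit ∧ ∃ q, k = j + i * q) := by
        constructor
        · rintro ⟨hkl, q, rfl⟩
          exact ⟨hkl, q + 1, by ring⟩
        · rintro ⟨hkl, q, rfl⟩
          rcases q with _ | q
          · omega
          · exact ⟨hkl, q, by ring⟩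
      rw [hiff]
  | case2 j arr h =>
    intro hsz
    have hno : ¬(k ≤ limit ∧ ∃ q, k = j + i * q) := by
      rintro ⟨hkl, q, rfl⟩
      have : ¬ j ≤ limit := fun hj => h ⟨hi, hj⟩
      omega
    simp [hno]

-- the sieve-loop invariant: after all i < i0 were processed, a cell k holds `true`
-- iff k ≥ 2 and no processed prime p with p*p ≤ k divides k
def SInv (limit i0 : Nat) (arr : Array Bool) : Prop :=
  arr.size = limit + 1 ∧
    ∀ k, k ≤ limit →
      (arr.getD k false = true ↔
        2 ≤ k ∧ ∀ p, p < i0 → Nat.Prime p → p ∣ k → ¬(p * p ≤ k))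

theorem minFac_lt (n : Nat) (h2 : 2 ≤ n) (hn : ¬ Nat.Prime n) : n.minFac < n := by
  have h1 := Nat.minFac_dvd n
  have hp := Nat.minFac_prime (by omega : n ≠ 1)
  have hle := Nat.le_of_dvd (by omega) h1
  rcases lt_or_eq_of_le hle with h | h
  · exact h
  · exact absurd (h ▸ hp) hn

theorem inv_primeAt (limit i : Nat) (arr : Array Bool) (h : SInv limit i arr)
    (hi2 : 2 ≤ i) (hil : i ≤ limit) :
    (arr.getD i false = true ↔ Nat.Prime i) := by
  rw [h.2 i hil]
  constructor
  · rintro ⟨-, hall⟩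
    by_contra hp
    have hmf := Nat.minFac_prime (by omega : i ≠ 1)
    have hdvd := Nat.minFac_dvd i
    have hlt := minFac_lt i hi2 hp
    have hsq : i.minFac * i.minFac ≤ i := by
      have := Nat.minFac_sq_le_self (by omega : 0 < i) hp
      simpa [pow_two] using this
    exact hall i.minFac hlt hmf hdvd hsq
  · intro hp
    refine ⟨hi2, fun p hplt hpp hpd hsq => ?_⟩
    rcases Nat.Prime.eq_one_or_self_of_dvd hp p hpd with h1 | h1
    · exact absurd h1 (Nat.Prime.ne_one hpp)
    · omega

theorem sieveLoop_inv (limit bound : Nat) (i : Nat) (arr : Array Bool) (hb : bound ≤ limit) :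
    2 ≤ i → SInv limit i arr →
    SInv limit (max i (bound + 1)) (sieveLoopA limit bound i arr) := by
  fun_induction sieveLoopA limit bound i arr with
  | case1 i arr hle ih =>
    intro hi2 hinv
    have hmax : max i (bound + 1) = max (i + 1) (bound + 1) := by omega
    rw [hmax]
    apply ih (by omega)
    have hil : i ≤ limit := le_trans hle hb
    have hprime := inv_primeAt limit i arr hinv hi2 hil
    by_cases hgd : arr.getD i false = true
    · rw [dif_pos hgd]
      have hp : Nat.Prime i := hprime.mp hgd
      refine ⟨by rw [mark_size]; exact hinv.1, fun k hk => ?_⟩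
      rw [mark_getD i limit (i * i) arr k (by omega) hinv.1]
      rw [hinv.2 k hk]
      have hdiv : (k ≤ limit ∧ ∃ q, k = i * i + i * q) ↔ (i ∣ k ∧ i * i ≤ k) := by
        constructor
        · rintro ⟨-, q, rfl⟩
          exact ⟨⟨i + q, by ring⟩, by omega⟩
        · rintro ⟨⟨t, rfl⟩, hsq⟩
          have hit : i ≤ t := Nat.le_of_mul_le_mul_left hsq (by omega)
          obtain ⟨q, hq⟩ : ∃ q, t = i + q := ⟨t - i, by omega⟩
          exact ⟨hk, q, by rw [hq]; ring⟩
      rw [hdiv]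
      constructor
      · rintro ⟨⟨h2k, hall⟩, hnot⟩
        refine ⟨h2k, fun p hplt hpp hpd hpsq => ?_⟩
        rcases Nat.lt_succ_iff_lt_or_eq.mp hplt with hcase | hcase
        · exact hall p hcase hpp hpd hpsq
        · subst hcase; exact hnot ⟨hpd, hpsq⟩
      · rintro ⟨h2k, hall⟩
        exact ⟨⟨h2k, fun p hplt => hall p (by omega)⟩,
          fun ⟨hd, hs⟩ => hall i (by omega) hp hd hs⟩
    · rw [dif_neg hgd]
      have hnp : ¬ Nat.Prime i := fun hpp => hgd (hprime.mpr hpp)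
      refine ⟨hinv.1, fun k hk => ?_⟩
      rw [hinv.2 k hk]
      constructor
      · rintro ⟨h2k, hall⟩
        refine ⟨h2k, fun p hplt hpp hpd hpsq => ?_⟩
        rcases Nat.lt_succ_iff_lt_or_eq.mp hplt with hcase | hcase
        · exact hall p hcase hpp hpd hpsq
        · subst hcase; exact hnp hpp
      · rintro ⟨h2k, hall⟩
        exact ⟨h2k, fun p hplt => hall p (by omega)⟩
  | case2 i arr hle =>
    intro hi2 hinv
    have : max i (bound + 1) = i := by omega
    rw [this]
    exact hinv

theorem init_inv : SInv 1000000 2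
    (((Array.replicate (1000000 + 1) true).set! 0 false).set! 1 false) := by
  refine ⟨by simp, fun k hk => ?_⟩
  rw [getD_set! _ 1 k false (by simp), getD_set! _ 0 k false (by simp)]
  constructor
  · intro ht
    refine ⟨?_, fun p hplt hpp _ _ => absurd hpp.two_le (by omega)⟩
    by_contra h2
    rcases (by omega : k = 0 ∨ k = 1) with rfl | rfl
    · rw [if_neg (by omega), if_pos rfl] at ht; exact absurd ht (by simp)
    · rw [if_pos rfl] at ht; exact absurd ht (by simp)
  · rintro ⟨h2, -⟩
    rw [if_neg (by omega), if_neg (by omega), Array.getD_eq_getD_getElem?,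
      Array.getElem?_replicate, if_pos (by omega)]
    rfl

theorem sieve_correct (k : Nat) (hk : k ≤ 1000000) :
    ((sieve_of_eratosthenes 1000000).getD k false = true ↔ Nat.Prime k) := by
  have hb : Nat.sqrt 1000000 ≤ 1000000 := Nat.sqrt_le_self _
  have h1 : 1 ≤ Nat.sqrt 1000000 := Nat.le_sqrt.mpr (by norm_num)
  have hfin := sieveLoop_inv 1000000 (Nat.sqrt 1000000) 2 _ hb (by omega) init_inv
  have hmax : max 2 (Nat.sqrt 1000000 + 1) = Nat.sqrt 1000000 + 1 := by omega
  rw [hmax] at hfin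
  unfold sieve_of_eratosthenes
  rw [hfin.2 k hk]
  constructor
  · rintro ⟨h2, hall⟩
    rw [Nat.prime_def_le_sqrt]
    refine ⟨h2, fun mm h2m hms hmd => ?_⟩
    have hmm : mm * mm ≤ k := Nat.le_sqrt.mp hms
    have hpp := Nat.minFac_prime (by omega : mm ≠ 1)
    have hple : mm.minFac ≤ mm := Nat.minFac_le (by omega)
    have hpd : mm.minFac ∣ k := dvd_trans (Nat.minFac_dvd mm) hmd
    have hpsq : mm.minFac * mm.minFac ≤ k := le_trans (Nat.mul_le_mul hple hple) hmm
    have hplt : mm.minFac < Nat.sqrt 1000000 + 1 := by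
      have : mm.minFac ≤ Nat.sqrt 1000000 := Nat.le_sqrt.mpr (le_trans hpsq hk)
      omega
    exact hall mm.minFac hplt hpp hpd hpsq
  · intro hp
    refine ⟨hp.two_le, fun p hplt hpp hpd hpsq => ?_⟩
    rcases Nat.Prime.eq_one_or_self_of_dvd hp p hpd with h | h
    · exact absurd h hpp.ne_one
    · subst h
      have h2p : 2 ≤ p := hpp.two_le
      have : 2 * p ≤ p * p := Nat.mul_le_mul_right p h2p
      omega

theorem trialLoop_iff (x i : Nat) : 1 ≤ i →
    (trialLoop x i = true ↔ ∀ mm, i ≤ mm → mm * mm ≤ x → ¬(mm ∣ x)) := by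
  fun_induction trialLoop x i with
  | case1 i h hmod =>
    intro hi
    exact iff_of_false (by simp)
      (fun hall => hall i (le_refl i) h (Nat.dvd_of_mod_eq_zero hmod))
  | case2 i h hmod ih =>
    intro hi
    rw [ih (by omega)]
    constructor
    · intro hall mm hmm hsq hd
      rcases Nat.eq_or_lt_of_le hmm with rfl | hlt
      · rcases hd with ⟨c, rfl⟩
        exact hmod (Nat.mul_mod_right i c)
      · exact hall mm hlt hsq hd
    · exact fun hall mm hmm hsq => hall mm (by omega) hsq
  | case3 i h =>
    intro hi
    exact iff_of_true rfl (fun mm hmm hsq hd => by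
      have := Nat.mul_le_mul hmm hmm
      omega)

theorem is_prime_B_iff (x : Nat) : (is_prime_B x = true ↔ Nat.Prime x) := by
  unfold is_prime_B
  by_cases h2 : x < 2
  · rw [if_pos h2]
    exact iff_of_false (by simp) (fun hp => absurd hp.two_le (by omega))
  · rw [if_neg h2]
    rw [trialLoop_iff x 2 (by omega)]
    rw [Nat.prime_def_le_sqrt]
    constructor
    · exact fun hall => ⟨by omega, fun mm h2m hms => hall mm h2m (Nat.le_sqrt.mp hms)⟩
    · rintro ⟨-, hall⟩ mm h2m hsq
      exact hall mm h2m (Nat.le_sqrt.mpr hsq)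

theorem fold_skip (n m : Int) (l : List Nat) : ∀ (pos c : Int), m < pos →
    (enumFrom pos l).foldl
      (fun c pf => if n ≤ pf.1 ∧ pf.1 ≤ m ∧ !is_prime_B pf.2 then c + 1 else c) c = c := by
  induction l with
  | nil => intro pos c _; rfl
  | cons f t ih =>
    intro pos c hm
    simp only [enumFrom, List.foldl_cons]
    rw [if_neg (fun hc => absurd hc.2.1 (by omega))]
    exact ih (pos + 1) c (by omega)

theorem main_loop (pc : Array Bool)
    (hpc : ∀ v, v ≤ 1000000 → pc.getD v false = decide (Nat.Prime v))
    (n m : Int) : ∀ (fuel : Nat), ∀ (a b : Nat) (pos cnt : Int),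
    fibLoopA pc n m fuel a b pos cnt =
      (enumFrom pos (genFibs fuel a b)).foldl
        (fun c pf => if n ≤ pf.1 ∧ pf.1 ≤ m ∧ !is_prime_B pf.2 then c + 1 else c) cnt := by
  intro fuel
  induction fuel with
  | zero => intro a b pos cnt; rfl
  | succ f ih =>
    intro a b pos cnt
    simp only [fibLoopA, genFibs]
    by_cases hb : b ≤ 1000000
    · by_cases hm : pos ≤ m
      · rw [if_pos ⟨hb, hm⟩, if_pos hb]
        simp only [enumFrom, List.foldl_cons]
        rw [ih]
        congr 1
        have hpb : pc.getD b false = decide (Nat.Prime b) := hpc b hb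
        have hib : is_prime_B b = decide (Nat.Prime b) := by
          apply Bool.eq_iff_iff.mpr
          simp [is_prime_B_iff]
        rw [hpb, hib]
        by_cases hn : n ≤ pos
        · by_cases hpr : Nat.Prime b
          · simp [hpr, hm, hn]
          · simp [hpr, hm, hn]
        · rw [if_neg hn, if_neg (fun hc => hn hc.1)]
      · rw [if_neg (fun hc => hm hc.2), if_pos hb]
        exact (fold_skip n m (b :: genFibs f b (a + b)) pos cnt (by omega)).symm
    · rw [if_neg (fun hc => hb hc.1), if_neg hb]
      rfl

theorem main_equiv (n m : Int) :
    count_non_prime_fibonacci_in_range n m = count_non_prime_fibonacci_in_range_alt n m := by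
  unfold count_non_prime_fibonacci_in_range count_non_prime_fibonacci_in_range_alt
  exact main_loop _ (fun v hv => by
    have := sieve_correct v hv
    exact Bool.eq_iff_iff.mpr (by simpa using this)) n m 40 0 1 2 0

-- ===== VERDICT (by name: the statement is the Claim_ definition above) =====
theorem count_non_prime_fibonacci_in_range_spec : Claim_equal_count_non_prime_fibonacci_in_range := by
  intro n m _
  exact main_equiv n m
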